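-- pv_equiv track=rewrite | github.com/d1zm4as/CodeWars | Python/6 Kyu/find_added.py | find_added
-- ===== SOURCE A (Python) =====
-- from collections import Counter
-- from collections import Counter
--
-- def find_added(s, r):
--     a = Counter(s)
--     b = Counter(r)
--
--     lista=  []
--
--     for x in set(r):
--         if x in set(s):
--             tam =  (b[x]-a[x])*x
--             lista.append(tam)
--         else:
--             tam =  b[x]*x
--             lista.append(tam)
--
--
--     return "".join(sorted(lista))
-- ===== SOURCE B (Python) =====
-- def find_added(s, r):
--     # sort both strings, then a single linear merge collects chars of r not cancelled by s
--     rs = sorted(r)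
--     ss = sorted(s)
--     out = []
--     i = j = 0
--     while i < len(rs):
--         if j < len(ss) and ss[j] < rs[i]:
--             j += 1
--         elif j < len(ss) and ss[j] == rs[i]:
--             i += 1
--             j += 1
--         else:
--             out.append(rs[i])
--             i += 1
--     return "".join(out)
-- ===== Notes on version B (the rewrite author's own statement) =====
-- stated objective: alternative
-- what changed: Replaces A's Counter-difference with string multiplication per distinct char plus a final sort of the chunks by a single linear two-pointer merge of the two sorted strings that collects r's unmatched characters already in order.
import Mathlib
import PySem

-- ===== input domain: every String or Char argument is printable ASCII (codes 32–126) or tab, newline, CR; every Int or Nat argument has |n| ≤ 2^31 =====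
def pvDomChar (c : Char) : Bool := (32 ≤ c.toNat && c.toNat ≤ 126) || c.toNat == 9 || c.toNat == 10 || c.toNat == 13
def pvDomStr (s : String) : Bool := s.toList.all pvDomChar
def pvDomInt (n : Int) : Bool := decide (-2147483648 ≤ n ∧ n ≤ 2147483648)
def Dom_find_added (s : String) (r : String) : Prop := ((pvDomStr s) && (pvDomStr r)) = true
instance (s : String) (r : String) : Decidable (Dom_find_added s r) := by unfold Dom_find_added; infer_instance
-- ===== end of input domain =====

-- B replaces A's Counter-difference / string-multiplication / final sort with: sort both strings
-- once, then one linear merge collects the chars of r not cancelled by s, already in order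
-- (alternative decomposition; no final sort, no per-character counting).

-- ===== PORT A =====
def find_added (s : String) (r : String) : String :=
  let a := PySem.Dict.counter s.toList
  let b := PySem.Dict.counter r.toList
  let lista : List (List Char) :=
    (PySem.Set.ofList r.toList).foldl (fun acc x =>
      if PySem.Set.contains (PySem.Set.ofList s.toList) x then
        acc ++ [PySem.List.pyRepeat [x] (b.getD x 0 - a.getD x 0)]
      else
        acc ++ [PySem.List.pyRepeat [x] (b.getD x 0)]) []
  String.ofList (PySem.Chars.join [] (PySem.List.sorted lista (fun x => x)))

-- ===== PORT B =====
-- B's while loop over indices i (into sorted r) and j (into sorted s), as structural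
-- recursion on the two remaining suffixes (same state, same three branches).
def mergeDiff : List Char → List Char → List Char
  | rs, [] => rs
  | [], _ :: _ => []
  | r :: rs, t :: ts =>
    if t < r then mergeDiff (r :: rs) ts
    else if t = r then mergeDiff rs ts
    else r :: mergeDiff rs (t :: ts)
  termination_by rs ss => rs.length + ss.length

def find_added_alt (s : String) (r : String) : String :=
  String.ofList (mergeDiff (PySem.List.sorted r.toList (fun x => x))
                           (PySem.List.sorted s.toList (fun x => x)))

-- ===== PRECONDITION & SPEC =====
def Spec_find_added (s : String) (r : String) (out : String) : Prop := out = find_added_alt s r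
instance (s : String) (r : String) (out : String) : Decidable (Spec_find_added s r out) := by unfold Spec_find_added; infer_instance

-- ===== CLAIM (what is proved, stated in full; the proofs are below) =====
def Claim_equal_find_added : Prop := ∀ (s : String) (r : String), Dom_find_added s r → Spec_find_added s r (find_added s r)

-- ===== LEMMAS AND PROOFS =====

-- ''.join (empty separator) is flatten
theorem join_empty_sep (L : List (List Char)) : PySem.Chars.join [] L = L.flatten := by
  simp [PySem.Chars.join, List.intercalate]
  induction L with
  | nil => simp
  | cons a t ih => cases t <;> simp_all [List.intersperse]

-- the per-character chunk both of A's branches produce (Python's k*x with k ≤ 0 is "")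
def chunk (sl rl : List Char) (x : Char) : List Char :=
  List.replicate (rl.count x - sl.count x) x

theorem lista_eq (sl rl : List Char) :
    (PySem.Set.ofList rl).foldl (fun acc x =>
      if PySem.Set.contains (PySem.Set.ofList sl) x then
        acc ++ [PySem.List.pyRepeat [x] ((PySem.Dict.counter rl).getD x 0 - (PySem.Dict.counter sl).getD x 0)]
      else
        acc ++ [PySem.List.pyRepeat [x] ((PySem.Dict.counter rl).getD x 0)]) []
    = (PySem.Set.ofList rl).map (chunk sl rl) := by
  rw [PySem.List.foldl_congr_mem _ _ (fun acc x => acc ++ [chunk sl rl x]) _ ?_,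
      PySem.List.foldl_append_singleton_eq_map]
  · simp
  · intro acc x _
    by_cases hx : x ∈ PySem.Set.ofList sl
    · simp [PySem.Dict.getD_counter, PySem.List.pyRepeat_singleton, chunk]
      intro h
      exact absurd ((PySem.Set.mem_ofList sl x).1 hx) h
    · have hns : x ∉ sl := by simpa [PySem.Set.mem_ofList] using hx
      simp [hx, PySem.Dict.getD_counter, PySem.List.pyRepeat_singleton, chunk,
            List.count_eq_zero_of_not_mem hns]

theorem count_flatten_map_replicate (f : Char → Nat) (L : List Char) (hnd : L.Nodup) (c : Char) :
    ((L.map (fun x => List.replicate (f x) x)).flatten.count c) = if c ∈ L then f c else 0 := by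
  induction L with
  | nil => simp
  | cons x t ih =>
    simp only [List.map_cons, List.flatten_cons, List.count_append, List.count_replicate]
    rcases List.nodup_cons.1 hnd with ⟨hx, ht⟩
    by_cases hc : c = x
    · subst hc
      simp [ih ht, hx]
    · simp [Ne.symm hc, hc, ih ht]

theorem mergeDiff_sublist (rs ss : List Char) : (mergeDiff rs ss).Sublist rs := by
  induction rs, ss using mergeDiff.induct with
  | case1 rs => simp [mergeDiff]
  | case2 t ts => simp [mergeDiff]
  | case3 r rs t ts h ih => simpa [mergeDiff, h] using ih
  | case4 rs t ts h1 ih =>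
    rw [mergeDiff, if_neg h1, if_pos rfl]
    exact ih.trans (List.sublist_cons_self t rs)
  | case5 r rs t ts h1 h2 ih =>
    rw [mergeDiff, if_neg h1, if_neg h2]
    exact ih.cons₂ r

theorem count_eq_zero_of_lt_head {r c : Char} {rs : List Char}
    (h : (r :: rs).Pairwise (· ≤ ·)) (hc : c < r) : (r :: rs).count c = 0 := by
  rw [List.count_eq_zero]
  intro hm
  rcases List.mem_cons.1 hm with h1 | h1
  · exact absurd h1 (fun e => absurd (e ▸ hc) (lt_irrefl _))
  · exact absurd ((List.pairwise_cons.1 h).1 c h1) (not_le.2 hc)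

theorem mergeDiff_count (rs ss : List Char)
    (hrs : rs.Pairwise (· ≤ ·)) (hss : ss.Pairwise (· ≤ ·)) (c : Char) :
    (mergeDiff rs ss).count c = rs.count c - ss.count c := by
  induction rs, ss using mergeDiff.induct with
  | case1 rs => simp [mergeDiff]
  | case2 t ts => simp [mergeDiff]
  | case3 r rs t ts h ih =>
    rw [mergeDiff, if_pos h]
    rw [ih hrs (List.Pairwise.sublist (List.sublist_cons_self t ts) hss)]
    by_cases hc : c = t
    · subst hc
      have h0 : (r :: rs).count c = 0 := count_eq_zero_of_lt_head hrs h
      simp [h0]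
    · simp [List.count_cons, Ne.symm hc]
  | case4 rs t ts h1 ih =>
    rw [mergeDiff, if_neg h1, if_pos rfl]
    rw [ih (List.Pairwise.sublist (List.sublist_cons_self t rs) hrs)
          (List.Pairwise.sublist (List.sublist_cons_self t ts) hss)]
    by_cases hc : c = t
    · subst hc; simp
    · simp [Ne.symm hc]
  | case5 r rs t ts h1 h2 ih =>
    rw [mergeDiff, if_neg h1, if_neg h2]
    have hrt : r < t := by
      rcases lt_trichotomy t r with h | h | h
      · exact absurd h h1
      · exact absurd h h2
      · exact h
    rw [List.count_cons, ih (List.Pairwise.sublist (List.sublist_cons_self r rs) hrs) hss]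
    by_cases hc : c = r
    · subst hc
      have h0 : (t :: ts).count c = 0 := count_eq_zero_of_lt_head hss hrt
      simp [h0]
    · simp [List.count_cons, Ne.symm hc]

-- instance bridges: the ports' default LT/Decidable instances vs the LinearOrder ones the sorted_ lemmas use
theorem sorted_inst_conv_strs (xs : List (List Char)) :
    PySem.List.sorted xs (fun x => x)
      = @PySem.List.sorted (List Char) (List Char) List.instLinearOrder.toLT LinearOrder.toDecidableLT xs (fun x => x) false := by
  congr 1

theorem sorted_inst_conv_chars (xs : List Char) :
    PySem.List.sorted xs (fun x => x)
      = @PySem.List.sorted Char Char Char.instLT Char.instDecidableLt xs (fun x => x) false := by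
  congr 1

-- lex ≤ between nonempty constant lists forces ≤ on the characters
theorem le_of_replicate_le {n m : Nat} {a b : Char}
    (hn : 0 < n) (hm : 0 < m)
    (h : (List.replicate n a : List Char) ≤ List.replicate m b) : a ≤ b := by
  by_contra hab
  have hba : b < a := lt_of_not_ge hab
  have hlt : (List.replicate m b : List Char) < List.replicate n a := by
    obtain ⟨n', rfl⟩ := Nat.exists_eq_add_of_lt hn
    obtain ⟨m', rfl⟩ := Nat.exists_eq_add_of_lt hm
    simp only [List.replicate_succ]
    exact List.cons_lt_cons_iff.2 (Or.inl hba)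
  exact Std.not_lt.mpr h hlt

-- flatten of A's sorted chunk list is sorted char by char
theorem flatten_sorted_chunks (sl rl : List Char) :
    ((PySem.List.sorted ((PySem.Set.ofList rl).map (chunk sl rl)) (fun x => x)).flatten).Pairwise (· ≤ ·) := by
  rw [List.pairwise_flatten]
  have hmem : ∀ l ∈ PySem.List.sorted ((PySem.Set.ofList rl).map (chunk sl rl)) (fun x => x),
      ∃ n a, l = List.replicate n a := by
    intro l hl
    rw [PySem.List.mem_sorted] at hl
    rcases List.mem_map.1 hl with ⟨x, _, rfl⟩
    exact ⟨_, x, rfl⟩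
  constructor
  · intro l hl
    rcases hmem l hl with ⟨n, a, rfl⟩
    exact List.pairwise_replicate.2 (Or.inr le_rfl)
  · have hp := PySem.List.sorted_pairwise ((PySem.Set.ofList rl).map (chunk sl rl)) (fun x => x)
    rw [← sorted_inst_conv_strs] at hp
    refine hp.imp_of_mem ?_
    intro l₁ l₂ h1 h2 hle x hx y hy
    rcases hmem _ h1 with ⟨n, a, rfl⟩
    rcases hmem _ h2 with ⟨m, b, rfl⟩
    have hxa := List.eq_of_mem_replicate hx
    have hyb := List.eq_of_mem_replicate hy
    subst hxa; subst hyb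
    exact le_of_replicate_le (by simpa using List.length_pos_of_mem hx)
      (by simpa using List.length_pos_of_mem hy) hle

theorem count_A (sl rl : List Char) (c : Char) :
    ((PySem.List.sorted ((PySem.Set.ofList rl).map (chunk sl rl)) (fun x => x)).flatten).count c
      = rl.count c - sl.count c := by
  have hperm := (PySem.List.sorted_perm ((PySem.Set.ofList rl).map (chunk sl rl)) (fun x => x) false).flatten
  rw [hperm.count_eq c]
  have := count_flatten_map_replicate (fun x => rl.count x - sl.count x) (PySem.Set.ofList rl)
    (PySem.Set.nodup_ofList rl) c
  unfold chunk
  rw [this]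
  by_cases hc : c ∈ PySem.Set.ofList rl
  · simp [hc]
  · have : c ∉ rl := by simpa [PySem.Set.mem_ofList] using hc
    simp [hc, List.count_eq_zero_of_not_mem this]

theorem main_eq (sl rl : List Char) :
    (PySem.List.sorted ((PySem.Set.ofList rl).map (chunk sl rl)) (fun x => x)).flatten
      = mergeDiff (PySem.List.sorted rl (fun x => x)) (PySem.List.sorted sl (fun x => x)) := by
  have hsr : (PySem.List.sorted rl (fun x => x)).Pairwise (fun a b : Char => a ≤ b) := by
    rw [sorted_inst_conv_chars]
    exact PySem.List.sorted_pairwise rl (fun x => x)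
  have hss : (PySem.List.sorted sl (fun x => x)).Pairwise (fun a b : Char => a ≤ b) := by
    rw [sorted_inst_conv_chars]
    exact PySem.List.sorted_pairwise sl (fun x => x)
  have hA := flatten_sorted_chunks sl rl
  have hB : (mergeDiff (PySem.List.sorted rl (fun x => x)) (PySem.List.sorted sl (fun x => x))).Pairwise
      (fun a b : Char => a ≤ b) :=
    List.Pairwise.sublist (mergeDiff_sublist _ _) hsr
  have hcount : ∀ c : Char,
      ((PySem.List.sorted ((PySem.Set.ofList rl).map (chunk sl rl)) (fun x => x)).flatten).count c
        = (mergeDiff (PySem.List.sorted rl (fun x => x)) (PySem.List.sorted sl (fun x => x))).count c := by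
    intro c
    rw [count_A, mergeDiff_count _ _ hsr hss c,
        (PySem.List.sorted_perm rl (fun x => x) false).count_eq c,
        (PySem.List.sorted_perm sl (fun x => x) false).count_eq c]
  exact List.Perm.eq_of_pairwise (fun a b _ _ h1 h2 => le_antisymm h1 h2) hA hB
    (List.perm_iff_count.2 hcount)

-- ===== VERDICT (by name: the statement is the Claim_ definition above) =====
theorem find_added_spec : Claim_equal_find_added := by
  intro s r _
  show find_added s r = find_added_alt s r
  unfold find_added find_added_alt
  simp only []
  rw [lista_eq, join_empty_sep, main_eq]
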